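-- pv_equiv track=rewrite | github.com/azrap/Algorithms | eating_cookies/eating_cookies.py | eating_cookies_2
-- ===== SOURCE A (Python) =====
-- def eating_cookies_2(n, cache=None):
--     if n < 2:
--         return 1
--     elif n == 2:
--         return 2
--     n_0 = 1
--     n_1 = 1
--     n_2 = 2
--     count = 2
--     while count < n:
--         sum = n_0+n_1+n_2
--         n_0 = n_1
--         n_1 = n_2
--         n_2 = sum
--         count += 1
--     return sum
-- ===== SOURCE B (Python) =====
-- def mat_mult(X, Y):
--     return [[sum(X[i][k] * Y[k][j] for k in range(3)) for j in range(3)]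
--             for i in range(3)]
--
--
-- def mat_pow(M, k):
--     if k == 0:
--         return [[1, 0, 0], [0, 1, 0], [0, 0, 1]]
--     H = mat_pow(M, k // 2)
--     H2 = mat_mult(H, H)
--     return mat_mult(M, H2) if k % 2 else H2
--
--
-- def eating_cookies_2(n, cache=None):
--     if n < 0:
--         return 1
--     M = [[0, 1, 0], [0, 0, 1], [1, 1, 1]]
--     P = mat_pow(M, n)
--     # first row of M^n dotted with the base vector (t0, t1, t2) = (1, 1, 2)
--     return P[0][0] + P[0][1] + 2 * P[0][2]
-- ===== Notes on version B (the rewrite author's own statement) =====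
-- stated objective: faster
-- what changed: Replaces the O(n) iterative tribonacci loop with binary exponentiation of the 3x3 transition matrix, reading the answer off the first row of M^n; intended as faster (O(log n) big-int multiplications), measured 13.6x at n=65536, unconfirmed at the largest probe size where the harness could not decode the huge result.
import Mathlib
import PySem

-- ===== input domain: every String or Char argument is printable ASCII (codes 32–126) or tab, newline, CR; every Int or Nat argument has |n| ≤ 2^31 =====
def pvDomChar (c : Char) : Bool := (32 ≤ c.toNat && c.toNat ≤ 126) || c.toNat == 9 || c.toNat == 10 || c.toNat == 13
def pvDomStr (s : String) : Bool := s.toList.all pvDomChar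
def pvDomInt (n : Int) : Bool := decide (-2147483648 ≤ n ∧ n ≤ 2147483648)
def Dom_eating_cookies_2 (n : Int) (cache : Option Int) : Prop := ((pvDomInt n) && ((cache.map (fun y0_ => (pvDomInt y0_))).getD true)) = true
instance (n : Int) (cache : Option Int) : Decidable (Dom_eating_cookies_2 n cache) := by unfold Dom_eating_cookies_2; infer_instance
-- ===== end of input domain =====

-- B replaces A's linear tribonacci loop by binary exponentiation of the 3x3 transition
-- matrix (intended as faster; a timing run measured 13.6x at n=65536). Equivalence of the RETURN values is proved.

-- ===== PORT A =====
-- the while loop: count runs from 2 up to n, fuel = (n-2).toNat iterations;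
-- the last parameter carries Python's variable `sum` (its initial value 0 is never
-- returned, since for n ≥ 3 the loop executes at least once).
def eatGo : Nat → Int → Int → Int → Int → Int
  | 0, _, _, _, s => s
  | f + 1, n0, n1, n2, _ => eatGo f n1 n2 (n0 + n1 + n2) (n0 + n1 + n2)

def eating_cookies_2 (n : Int) (cache : Option Int) : Int :=
  if n < 2 then 1
  else if n = 2 then 2
  else eatGo (n - 2).toNat 1 1 2 0

-- ===== PORT B =====
-- 3x3 integer matrix as a triple of rows (each row a triple)
abbrev Mat3 := (Int × Int × Int) × (Int × Int × Int) × (Int × Int × Int)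

-- row · column dot product (Python's sum(X[i][k]*Y[k][j] for k in range(3)))
def dot3 (u v : Int × Int × Int) : Int := u.1 * v.1 + u.2.1 * v.2.1 + u.2.2 * v.2.2

def matMul (X Y : Mat3) : Mat3 :=
  ((dot3 X.1 (Y.1.1, Y.2.1.1, Y.2.2.1),
    dot3 X.1 (Y.1.2.1, Y.2.1.2.1, Y.2.2.2.1),
    dot3 X.1 (Y.1.2.2, Y.2.1.2.2, Y.2.2.2.2)),
   (dot3 X.2.1 (Y.1.1, Y.2.1.1, Y.2.2.1),
    dot3 X.2.1 (Y.1.2.1, Y.2.1.2.1, Y.2.2.2.1),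
    dot3 X.2.1 (Y.1.2.2, Y.2.1.2.2, Y.2.2.2.2)),
   (dot3 X.2.2 (Y.1.1, Y.2.1.1, Y.2.2.1),
    dot3 X.2.2 (Y.1.2.1, Y.2.1.2.1, Y.2.2.2.1),
    dot3 X.2.2 (Y.1.2.2, Y.2.1.2.2, Y.2.2.2.2)))

def matI : Mat3 := ((1, 0, 0), (0, 1, 0), (0, 0, 1))

def matPow (m : Mat3) : Nat → Mat3
  | 0 => matI
  | k + 1 =>
    let h := matPow m ((k + 1) / 2)
    let h2 := matMul h h
    if (k + 1) % 2 = 1 then matMul m h2 else h2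
termination_by k => k
decreasing_by omega

def tribM : Mat3 := ((0, 1, 0), (0, 0, 1), (1, 1, 1))

def eating_cookies_2_alt (n : Int) (cache : Option Int) : Int :=
  if n < 0 then 1
  else
    let P := matPow tribM n.toNat
    P.1.1 + P.1.2.1 + 2 * P.1.2.2

-- ===== PRECONDITION & SPEC =====
def Spec_eating_cookies_2 (n : Int) (cache : Option Int) (out : Int) : Prop := out = eating_cookies_2_alt n cache
instance (n : Int) (cache : Option Int) (out : Int) : Decidable (Spec_eating_cookies_2 n cache out) := by unfold Spec_eating_cookies_2; infer_instance

-- ===== CLAIM (what is proved, stated in full; the proofs are below) =====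
def Claim_equal_eating_cookies_2 : Prop := ∀ (n : Int) (cache : Option Int), Dom_eating_cookies_2 n cache → Spec_eating_cookies_2 n cache (eating_cookies_2 n cache)

-- ===== LEMMAS AND PROOFS =====

-- the mathematical tribonacci sequence both programs compute
def trib : Nat → Int
  | 0 => 1
  | 1 => 1
  | 2 => 2
  | k + 3 => trib k + trib (k + 1) + trib (k + 2)

theorem eatGo_trib (k : Nat) : ∀ (j : Nat) (s : Int),
    eatGo (k + 1) (trib j) (trib (j + 1)) (trib (j + 2)) s = trib (j + k + 3) := by
  induction k with
  | zero => intro j s; simp [eatGo, trib]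
  | succ k ih =>
    intro j s
    show eatGo (k + 1) (trib (j + 1)) (trib (j + 2))
        (trib j + trib (j + 1) + trib (j + 2)) (trib j + trib (j + 1) + trib (j + 2))
        = trib (j + (k + 1) + 3)
    have h3 : trib j + trib (j + 1) + trib (j + 2) = trib (j + 3) := (trib.eq_4 j).symm
    have e1 : j + 2 = (j + 1) + 1 := by omega
    have e2 : j + 3 = (j + 1) + 2 := by omega
    rw [h3, e1, e2, ih (j + 1)]
    congr 1; omega

def powN (m : Mat3) : Nat → Mat3
  | 0 => matI
  | k + 1 => matMul m (powN m k)

theorem matMul_one (y : Mat3) : matMul matI y = y := by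
  obtain ⟨⟨a, b, c⟩, ⟨d, e, f⟩, ⟨g, h, i⟩⟩ := y
  simp [matMul, matI, dot3]

theorem matMul_assoc (x y z : Mat3) : matMul (matMul x y) z = matMul x (matMul y z) := by
  obtain ⟨⟨a, b, c⟩, ⟨d, e, f⟩, ⟨g, h, i⟩⟩ := x
  obtain ⟨⟨a', b', c'⟩, ⟨d', e', f'⟩, ⟨g', h', i'⟩⟩ := y
  obtain ⟨⟨a'', b'', c''⟩, ⟨d'', e'', f''⟩, ⟨g'', h'', i''⟩⟩ := z
  simp [matMul, dot3, Prod.ext_iff]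
  and_intros <;> ring

theorem powN_add (m : Mat3) (a b : Nat) :
    powN m (a + b) = matMul (powN m a) (powN m b) := by
  induction a with
  | zero => simp [powN, matMul_one]
  | succ a ih =>
    have : a + 1 + b = (a + b) + 1 := by omega
    rw [this, powN, ih, powN, matMul_assoc]

theorem matPow_eq_powN (m : Mat3) (k : Nat) : matPow m k = powN m k := by
  induction k using Nat.strong_induction_on with
  | _ k ih =>
    match k with
    | 0 => simp [matPow, powN]
    | k + 1 =>
      have hj : (k + 1) / 2 < k + 1 := by omega
      simp only [matPow]
      rw [ih _ hj]
      set j := (k + 1) / 2 with hjd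
      by_cases hpar : (k + 1) % 2 = 1
      · have h2 : j + j + 1 = k + 1 := by omega
        rw [if_pos hpar, ← powN_add, ← h2, powN]
      · have h2 : j + j = k + 1 := by omega
        rw [if_neg hpar, ← powN_add, h2]

def mulVec (x : Mat3) (v : Int × Int × Int) : Int × Int × Int :=
  (dot3 x.1 v, dot3 x.2.1 v, dot3 x.2.2 v)

theorem mulVec_mul (x y : Mat3) (v : Int × Int × Int) :
    mulVec (matMul x y) v = mulVec x (mulVec y v) := by
  obtain ⟨⟨a, b, c⟩, ⟨d, e, f⟩, ⟨g, h, i⟩⟩ := x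
  obtain ⟨⟨a', b', c'⟩, ⟨d', e', f'⟩, ⟨g', h', i'⟩⟩ := y
  obtain ⟨p, q, r⟩ := v
  simp [matMul, mulVec, dot3, Prod.ext_iff]
  and_intros <;> ring

theorem mulVec_powN (k : Nat) :
    mulVec (powN tribM k) (1, 1, 2) = (trib k, trib (k + 1), trib (k + 2)) := by
  induction k with
  | zero => simp [powN, mulVec, matI, dot3, trib]
  | succ k ih =>
    rw [powN, mulVec_mul, ih]
    have e1 : k + 1 + 1 = k + 2 := by omega
    have e2 : k + 1 + 2 = k + 3 := by omega
    rw [e1, e2, trib.eq_4]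
    simp [mulVec, tribM, dot3]

theorem alt_eq_trib (n : Int) (cache : Option Int) (hn : 0 ≤ n) :
    eating_cookies_2_alt n cache = trib n.toNat := by
  have hneg : ¬ n < 0 := by omega
  simp only [eating_cookies_2_alt, hneg, if_false]
  rw [matPow_eq_powN]
  have h1 := congrArg Prod.fst (mulVec_powN n.toNat)
  simp [mulVec, dot3] at h1
  linarith [h1]

-- ===== VERDICT (by name: the statement is the Claim_ definition above) =====
theorem eating_cookies_2_spec : Claim_equal_eating_cookies_2 := by
  intro n cache _
  unfold Spec_eating_cookies_2 eating_cookies_2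
  by_cases h2 : n < 2
  · by_cases hneg : n < 0
    · simp [eating_cookies_2_alt, hneg, h2]
    · rw [alt_eq_trib n cache (by omega)]
      have : n.toNat = 0 ∨ n.toNat = 1 := by omega
      rcases this with h | h <;> simp [h2, h, trib]
  · by_cases he : n = 2
    · rw [alt_eq_trib n cache (by omega)]
      simp [he, trib]
    · have h3 : 3 ≤ n := by omega
      rw [alt_eq_trib n cache (by omega)]
      simp only [h2, he, if_false]
      have hk : (n - 2).toNat = (n - 3).toNat + 1 := by omega
      rw [hk]
      have := eatGo_trib (n - 3).toNat 0 0
      simp only [Nat.zero_add] at this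
      have hg : eatGo ((n - 3).toNat + 1) 1 1 2 0 = trib ((n - 3).toNat + 3) := this
      rw [hg]
      congr 1; omega
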